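-- pv_equiv track=rewrite | github.com/hub2nature/Stock_earnings_call_transcript | sentiment_score.py | prepared_remarks_only
-- ===== SOURCE A (Python) =====
-- def prepared_remarks_only(flat_sentences):
--     """
--     Begin after basic greetings/host cues; stop at 'question-and-answer session'.
--     Fallback to full text if markers missing.
--     """
--     start = False
--     out = []
--     for s in flat_sentences:
--         if not start and (
--             s.startswith("unknown speaker")
--             or s.startswith("operator")
--             or "good" in s or "hello" in s or "thank" in s or "welcome" in s
--         ):
--             start = True
--         if s.strip() == "question-and-answer session":
--             break
--         if start:
--             out.append(s)
--     return out if out else flat_sentences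
-- ===== SOURCE B (Python) =====
-- def _is_start(s):
--     return (s.startswith("unknown speaker")
--             or s.startswith("operator")
--             or "good" in s or "hello" in s or "thank" in s or "welcome" in s)
--
--
-- def prepared_remarks_only(flat_sentences):
--     """Compute the two boundaries up front and slice."""
--     sentences = list(flat_sentences)
--     m = len(sentences)
--     for i, s in enumerate(sentences):
--         if s.strip() == "question-and-answer session":
--             m = i
--             break
--     t = next((i for i in range(m) if _is_start(sentences[i])), None)
--     if t is None:
--         return flat_sentences
--     return sentences[t:m]
-- ===== Notes on version B (the rewrite author's own statement) =====
-- stated objective: alternative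
-- what changed: Replaces the fused flag-driven streaming loop (boolean start flag plus accumulator with break) by two independent index scans that locate the Q&A marker M and the first start cue T < M up front, then returns the slice sentences[T:M] or the original list.
import Mathlib
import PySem

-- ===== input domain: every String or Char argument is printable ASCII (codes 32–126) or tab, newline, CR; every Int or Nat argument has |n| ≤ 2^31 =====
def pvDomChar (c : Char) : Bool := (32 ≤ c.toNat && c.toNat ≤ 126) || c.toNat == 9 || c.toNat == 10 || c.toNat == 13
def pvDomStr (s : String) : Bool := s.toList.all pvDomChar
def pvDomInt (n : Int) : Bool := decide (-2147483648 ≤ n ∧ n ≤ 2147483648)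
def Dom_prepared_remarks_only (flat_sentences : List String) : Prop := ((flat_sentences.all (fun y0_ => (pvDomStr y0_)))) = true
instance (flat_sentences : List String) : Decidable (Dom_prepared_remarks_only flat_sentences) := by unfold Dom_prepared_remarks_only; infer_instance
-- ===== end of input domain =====

-- B computes the Q&A-marker index M and the first start-cue index T < M up front and slices,
-- instead of A's fused flag-driven streaming loop; alternative decomposition, same cost, return value only.


-- ===== PORT A =====
-- the inline condition of A's 'if not start and (...)' (factored out verbatim for readability)
def pvCondA (s : String) : Bool :=
  PySem.Str.startswith s "unknown speaker"
    || PySem.Str.startswith s "operator"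
    || PySem.Str.isIn "good" s || PySem.Str.isIn "hello" s
    || PySem.Str.isIn "thank" s || PySem.Str.isIn "welcome" s

-- the 'for s in flat_sentences' loop with its 'start' flag, 'out' accumulator and early break
def pvLoopA : List String → Bool → List String → List String
  | [], _, out => out
  | s :: rest, start, out =>
    let start' := if !start && pvCondA s then true else start
    if PySem.Str.strip s == "question-and-answer session" then out
    else pvLoopA rest start' (if start' then out ++ [s] else out)

def prepared_remarks_only (flat_sentences : List String) : List String :=
  let out := pvLoopA flat_sentences false []
  if out.isEmpty then flat_sentences else out

-- ===== PORT B =====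
-- _is_start from Source B
def pvIsStart (s : String) : Bool :=
  PySem.Str.startswith s "unknown speaker"
    || PySem.Str.startswith s "operator"
    || PySem.Str.isIn "good" s || PySem.Str.isIn "hello" s
    || PySem.Str.isIn "thank" s || PySem.Str.isIn "welcome" s

-- first index whose strip == marker, else the length (Source B's first for-loop)
def pvMarkerIdx : List String → Nat
  | [] => 0
  | s :: r => if PySem.Str.strip s == "question-and-answer session" then 0 else pvMarkerIdx r + 1

-- first index in the scanned prefix satisfying _is_start (Source B's 'next(...)' over range(m))
def pvStartIdx : List String → Option Nat
  | [] => none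
  | s :: r => if pvIsStart s then some 0 else (pvStartIdx r).map (· + 1)

def prepared_remarks_only_alt (flat_sentences : List String) : List String :=
  let m := pvMarkerIdx flat_sentences
  match pvStartIdx (flat_sentences.take m) with
  | none => flat_sentences
  | some t => (flat_sentences.take m).drop t   -- sentences[t:m], exact here since 0 ≤ t < m ≤ len

-- ===== PRECONDITION & SPEC =====
def Spec_prepared_remarks_only (flat_sentences : List String) (out : List String) : Prop := out = prepared_remarks_only_alt flat_sentences
instance (flat_sentences : List String) (out : List String) : Decidable (Spec_prepared_remarks_only flat_sentences out) := by unfold Spec_prepared_remarks_only; infer_instance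

-- ===== CLAIM (what is proved, stated in full; the proofs are below) =====
def Claim_equal_prepared_remarks_only : Prop := ∀ (flat_sentences : List String), Dom_prepared_remarks_only flat_sentences → Spec_prepared_remarks_only flat_sentences (prepared_remarks_only flat_sentences)

-- ===== LEMMAS AND PROOFS =====

-- once the flag is set, the loop appends everything up to (excluding) the marker
theorem pvLoopA_true (xs : List String) : ∀ out, pvLoopA xs true out = out ++ xs.take (pvMarkerIdx xs) := by
  induction xs with
  | nil => intro out; simp [pvLoopA, pvMarkerIdx]
  | cons s r ih =>
    intro out
    by_cases h : PySem.Str.strip s == "question-and-answer session"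
    · simp [pvLoopA, pvMarkerIdx, h]
    · simp [pvLoopA, pvMarkerIdx, h, ih]

-- characterisation of the loop from its initial state
theorem pvLoopA_false (xs : List String) :
    pvLoopA xs false [] =
      match pvStartIdx (xs.take (pvMarkerIdx xs)) with
      | none => []
      | some t => (xs.take (pvMarkerIdx xs)).drop t := by
  induction xs with
  | nil => simp [pvLoopA, pvMarkerIdx, pvStartIdx]
  | cons s r ih =>
    by_cases hm : PySem.Str.strip s == "question-and-answer session"
    · simp [pvLoopA, pvMarkerIdx, hm, pvStartIdx]
    · by_cases ht : pvIsStart s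
      · have hs : pvCondA s = true := ht
        simp [pvLoopA, pvMarkerIdx, hm, hs, pvStartIdx, ht, pvLoopA_true]
      · have hs : pvCondA s = false := by simpa using ht
        simp [pvLoopA, pvMarkerIdx, hm, hs, pvStartIdx, ht]
        rw [ih]
        cases pvStartIdx (r.take (pvMarkerIdx r)) with
        | none => simp
        | some t => simp

-- pvStartIdx points inside the list
theorem pvStartIdx_lt (l : List String) (t : Nat) (h : pvStartIdx l = some t) : t < l.length := by
  induction l generalizing t with
  | nil => simp [pvStartIdx] at h
  | cons s r ih =>
    by_cases hs : pvIsStart s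
    · simp [pvStartIdx, hs] at h
      simp [List.length_cons]; omega
    · simp [pvStartIdx, hs, Option.map_eq_some_iff] at h
      obtain ⟨t', ht', rfl⟩ := h
      have := ih t' ht'
      simpa using Nat.succ_lt_succ this

-- ===== VERDICT (by name: the statement is the Claim_ definition above) =====
theorem prepared_remarks_only_spec : Claim_equal_prepared_remarks_only := by
  intro xs _
  unfold Spec_prepared_remarks_only prepared_remarks_only prepared_remarks_only_alt
  rw [pvLoopA_false]
  cases h : pvStartIdx (xs.take (pvMarkerIdx xs)) with
  | none => simp [h]
  | some t =>
    have ht := pvStartIdx_lt _ _ h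
    have hne : ((xs.take (pvMarkerIdx xs)).drop t).isEmpty = false := by
      simp only [List.isEmpty_eq_false_iff, Ne, List.drop_eq_nil_iff]
      omega
    simp [hne, h]
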